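-- pv_equiv track=rewrite | github.com/Rupak143/NLPMINE | 10.py | apply_transformation_rules
-- ===== SOURCE A (Python) =====
-- def apply_transformation_rules(tagged_words):
--     """
--     Applies transformation rules to refine the initial tags.
--     """
--     rules = [
--         # If the word is 'is', change its tag to VBZ (Verb, 3rd person singular present)
--         (lambda word, tag: word.lower() == "is" and tag == "NN", "VBZ"),
--
--         # If the word ends with "ly", change its tag to RB (Adverb)
--         (lambda word, tag: word.endswith("ly") and tag == "NN", "RB"),
--     ]
--
--     transformed_tags = []
--     for word, tag in tagged_words:
--         transformed_tag = tag
--         for condition, new_tag in rules: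
--             if condition(word, tag):
--                 transformed_tag = new_tag
--                 break
--         transformed_tags.append((word, transformed_tag))
--     return transformed_tags
-- ===== SOURCE B (Python) =====
-- def apply_transformation_rules(tagged_words):
--     # Staged passes: each rule is applied as its own full rewrite pass.
--     # Pass 1 only changes tags away from "NN", so pass 2's tag test fires
--     # exactly where A's second (break-guarded) rule would.
--     step1 = [(w, "VBZ" if t == "NN" and w.lower() == "is" else t)
--              for w, t in tagged_words]
--     return [(w, "RB" if t == "NN" and w.endswith("ly") else t)
--             for w, t in step1]
-- ===== Notes on version B (the rewrite author's own statement) =====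
-- stated objective: alternative
-- what changed: Replaced A's per-element loop over a rules table with break by two staged full-list rewrite passes (one pass per rule over an intermediate list); correct since the first pass only moves tags away from NN.
import Mathlib
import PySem

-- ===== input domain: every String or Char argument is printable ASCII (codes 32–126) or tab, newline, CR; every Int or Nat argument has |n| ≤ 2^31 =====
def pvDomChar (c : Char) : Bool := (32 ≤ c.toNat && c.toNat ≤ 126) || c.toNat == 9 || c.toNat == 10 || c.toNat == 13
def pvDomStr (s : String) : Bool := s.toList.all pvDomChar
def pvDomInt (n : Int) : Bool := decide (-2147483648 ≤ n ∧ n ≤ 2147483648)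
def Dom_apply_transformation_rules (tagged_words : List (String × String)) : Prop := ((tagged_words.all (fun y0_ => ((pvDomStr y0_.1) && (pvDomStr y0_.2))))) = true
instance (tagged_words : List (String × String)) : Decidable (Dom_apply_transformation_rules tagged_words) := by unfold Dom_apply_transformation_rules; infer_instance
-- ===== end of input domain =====

-- B replaces A's per-element rules-table loop (with break) by two staged full-list rewrite passes, one per rule (alternative decomposition).


-- ===== PORT A =====
-- the rules table: list of (condition, new_tag) pairs, as in A
def pvRulesA : List ((String → String → Bool) × String) :=
  [ (fun word tag => PySem.Str.lower word == "is" && tag == "NN", "VBZ"),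
    (fun word tag => PySem.Str.endswith word "ly" && tag == "NN", "RB") ]

-- the inner 'for condition, new_tag in rules: … break' loop
def pvInnerA (word tag : String) : List ((String → String → Bool) × String) → String
  | [] => tag
  | (condition, new_tag) :: rest =>
      if condition word tag then new_tag else pvInnerA word tag rest

def apply_transformation_rules (tagged_words : List (String × String)) : List (String × String) :=
  tagged_words.foldl (fun transformed_tags wt =>
    transformed_tags ++ [(wt.1, pvInnerA wt.1 wt.2 pvRulesA)]) []

-- ===== PORT B =====
def apply_transformation_rules_alt (tagged_words : List (String × String)) : List (String × String) :=
  let step1 := tagged_words.map (fun wt =>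
    (wt.1, if wt.2 == "NN" && PySem.Str.lower wt.1 == "is" then "VBZ" else wt.2))
  step1.map (fun wt =>
    (wt.1, if wt.2 == "NN" && PySem.Str.endswith wt.1 "ly" then "RB" else wt.2))

-- ===== PRECONDITION & SPEC =====
def Spec_apply_transformation_rules (tagged_words : List (String × String)) (out : List (String × String)) : Prop := out = apply_transformation_rules_alt tagged_words
instance (tagged_words : List (String × String)) (out : List (String × String)) : Decidable (Spec_apply_transformation_rules tagged_words out) := by unfold Spec_apply_transformation_rules; infer_instance

-- ===== CLAIM =====
def Claim_equal_apply_transformation_rules : Prop := ∀ (tagged_words : List (String × String)), Dom_apply_transformation_rules tagged_words → Spec_apply_transformation_rules tagged_words (apply_transformation_rules tagged_words)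

-- ===== LEMMAS AND PROOFS =====
theorem pvFoldA_eq_map (tagged_words : List (String × String)) (acc : List (String × String)) :
    tagged_words.foldl (fun transformed_tags wt =>
      transformed_tags ++ [(wt.1, pvInnerA wt.1 wt.2 pvRulesA)]) acc
    = acc ++ tagged_words.map (fun wt => (wt.1, pvInnerA wt.1 wt.2 pvRulesA)) := by
  induction tagged_words generalizing acc with
  | nil => simp
  | cons h t ih => simp [List.foldl, ih]

-- per-element agreement: A's break-loop equals B's two staged rewrites composed
theorem pvElem_eq (w t : String) :
    pvInnerA w t pvRulesA
    = (if (if t == "NN" && PySem.Str.lower w == "is" then "VBZ" else t) == "NN"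
          && PySem.Str.endswith w "ly" then "RB"
       else (if t == "NN" && PySem.Str.lower w == "is" then "VBZ" else t)) := by
  by_cases h1 : t == "NN" && PySem.Str.lower w == "is"
  · simp [pvInnerA, pvRulesA] at h1 ⊢
    simp [h1]
  · by_cases h2 : t == "NN" && PySem.Str.endswith w "ly"
    · simp [pvInnerA, pvRulesA] at h1 h2 ⊢
      simp [h1, h2]
    · simp [pvInnerA, pvRulesA] at h1 h2 ⊢
      by_cases hn : t = "NN" <;> simp [hn] at h1 h2 ⊢ <;> simp [h1, h2]

-- ===== VERDICT =====
theorem apply_transformation_rules_spec : Claim_equal_apply_transformation_rules := by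
  intro tagged_words _
  unfold Spec_apply_transformation_rules apply_transformation_rules apply_transformation_rules_alt
  rw [pvFoldA_eq_map]
  simp only [List.map_map, List.nil_append]
  apply List.map_congr_left
  intro wt _
  simp [Function.comp, pvElem_eq]
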